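-- pv_equiv track=rewrite | github.com/evrirus/zadacha2 | 3etap.py | dfs_transitive
-- ===== SOURCE A (Python) =====
-- from typing import Dict, Any, List
--
-- def dfs_transitive(graph: Dict[str, List[str]], start_pkg: str) -> List[str]:
--     visited = set()
--     stack = [start_pkg]
--     result = []
--
--     while stack:
--         pkg = stack.pop()
--         if pkg in visited:
--             continue
--         visited.add(pkg)
--         result.append(pkg)
--         for dep in graph.get(pkg, []):
--             if dep not in visited:
--                 stack.append(dep)
--     result.remove(start_pkg)  # убрать сам пакет из списка зависимостей
--     return result
-- ===== SOURCE B (Python) =====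
-- def dfs_transitive(graph, start_pkg):
--     visited = set()
--     result = []
--
--     def helper(pkg):
--         if pkg in visited:
--             return
--         visited.add(pkg)
--         result.append(pkg)
--         for dep in reversed(graph.get(pkg, [])):
--             helper(dep)
--
--     helper(start_pkg)
--     result.remove(start_pkg)
--     return result
-- ===== Notes on version B (the rewrite author's own statement) =====
-- stated objective: alternative
-- what changed: The explicit-stack while loop is replaced by a recursive DFS helper that checks the visited set at call entry and recurses over each node's neighbours in reversed order, reproducing A's LIFO visitation order.
import Mathlib
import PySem

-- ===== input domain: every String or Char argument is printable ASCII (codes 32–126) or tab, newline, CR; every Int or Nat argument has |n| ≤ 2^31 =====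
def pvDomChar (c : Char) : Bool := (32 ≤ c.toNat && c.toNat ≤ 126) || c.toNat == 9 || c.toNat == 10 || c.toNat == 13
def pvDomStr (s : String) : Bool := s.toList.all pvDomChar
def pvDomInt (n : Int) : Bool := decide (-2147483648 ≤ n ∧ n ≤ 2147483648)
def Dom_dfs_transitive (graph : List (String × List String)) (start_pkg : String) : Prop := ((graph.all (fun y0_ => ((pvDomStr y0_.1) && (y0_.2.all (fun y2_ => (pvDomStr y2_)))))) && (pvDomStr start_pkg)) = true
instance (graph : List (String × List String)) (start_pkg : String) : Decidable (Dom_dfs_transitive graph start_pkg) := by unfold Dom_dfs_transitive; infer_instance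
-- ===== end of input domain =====

-- B rewrites A's explicit-stack DFS loop as a recursive DFS helper (visited checked at
-- call entry, neighbours taken in reversed order), same return value on every input.

-- graph.get(pkg, []) — shared dict-lookup primitive of the two ports
def pvDeps (graph : List (String × List String)) (p : String) : List String :=
  PySem.Dict.getD (PySem.Dict.mk graph) p []

-- every package name that can ever appear in the visited set (termination measure only)
def pvUniv (graph : List (String × List String)) (start_pkg : String) : List String :=
  start_pkg :: graph.flatMap (fun kv => kv.1 :: kv.2)

-- number of universe entries not yet visited (termination measure only)
def pvUnvis (graph : List (String × List String)) (start_pkg : String)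
    (visited : PySem.Set String) : Nat :=
  ((pvUniv graph start_pkg).filter (fun x => decide (x ∉ visited))).length

theorem pvDeps_of_not_mem_univ (graph : List (String × List String)) (start_pkg p : String)
    (h : p ∉ pvUniv graph start_pkg) : pvDeps graph p = [] := by
  induction graph with
  | nil => rfl
  | cons kv rest ih =>
      obtain ⟨k, ds⟩ := kv
      have hk : (k == p) = false := by
        simp only [beq_eq_false_iff_ne]
        intro he
        exact h (by simp [pvUniv, he])
      have h' : p ∉ pvUniv rest start_pkg := by
        intro hm
        apply h
        simp only [pvUniv, List.mem_cons, List.mem_flatMap] at hm ⊢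
        rcases hm with h1 | ⟨kv', hkv', h2⟩
        · exact Or.inl h1
        · exact Or.inr ⟨kv', by simp [hkv'], h2⟩
      have hrec := ih h'
      simp only [pvDeps, PySem.Dict.getD_eq_get?_getD] at hrec ⊢
      simp [PySem.Dict.get?_mk_cons, hk, hrec]

theorem pvUnvis_add_eq (graph : List (String × List String)) (start_pkg p : String)
    (v : PySem.Set String) (h : p ∉ pvUniv graph start_pkg) :
    pvUnvis graph start_pkg (PySem.Set.add v p) = pvUnvis graph start_pkg v := by
  unfold pvUnvis
  congr 1
  apply List.filter_congr
  intro x hx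
  have hxp : x ≠ p := fun he => h (he ▸ hx)
  simp [PySem.Set.mem_add, hxp]

theorem pvUnvis_add_lt (graph : List (String × List String)) (start_pkg p : String)
    (v : PySem.Set String) (hU : p ∈ pvUniv graph start_pkg) (hv : p ∉ v) :
    pvUnvis graph start_pkg (PySem.Set.add v p) < pvUnvis graph start_pkg v := by
  rw [PySem.Set.add_of_not_mem hv]
  unfold pvUnvis
  have hsub : List.Sublist
      ((pvUniv graph start_pkg).filter (fun x => decide (x ∉ v ++ [p])))
      (((pvUniv graph start_pkg).filter (fun x => decide (x ∉ v))).filter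
        (fun x => decide (x ∉ v ++ [p]))) := by
    rw [List.filter_filter]
    apply List.monotone_filter_right
    intro a
    simp only [List.mem_append, List.mem_singleton, decide_eq_true_eq, Bool.and_eq_true, not_or]
    tauto
  apply Nat.lt_of_le_of_lt hsub.length_le
  rw [List.length_filter_lt_length_iff_exists]
  refine ⟨p, ?_, ?_⟩
  · simp [List.mem_filter, hU, hv]
  · simp

-- ===== PORT A =====
-- A's while loop; the Python stack's top is the HEAD of `stack` (list.pop pops the end);
-- the inner `for dep … stack.append(dep)` is the foldl pushing unvisited deps onto the top.
def dfsLoopA (graph : List (String × List String)) (start_pkg : String)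
    (visited : PySem.Set String) (stack : List String) (result : List String) : List String :=
  match stack with
  | [] => result
  | pkg :: s =>
      if pkg ∈ visited then
        dfsLoopA graph start_pkg visited s result
      else
        dfsLoopA graph start_pkg (PySem.Set.add visited pkg)
          ((pvDeps graph pkg).foldl
            (fun st dep => if dep ∉ PySem.Set.add visited pkg then dep :: st else st) s)
          (result ++ [pkg])
termination_by (pvUnvis graph start_pkg visited, stack.length)
decreasing_by
  · exact Prod.Lex.right _ (Nat.lt_succ_self _)
  · rename_i hnv
    by_cases hU : pkg ∈ pvUniv graph start_pkg
    · exact Prod.Lex.left _ _ (pvUnvis_add_lt graph start_pkg pkg visited hU hnv)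
    · rw [pvDeps_of_not_mem_univ graph start_pkg pkg hU]
      rw [pvUnvis_add_eq graph start_pkg pkg visited hU]
      exact Prod.Lex.right _ (Nat.lt_succ_self _)

def dfs_transitive (graph : List (String × List String)) (start_pkg : String) : List String :=
  match PySem.List.remove? (dfsLoopA graph start_pkg PySem.Set.empty [start_pkg] []) start_pkg with
  | some r => r
  | none => []  -- unreachable: the first loop iteration always appends start_pkg to result

-- ===== PORT B =====
-- B's recursive helper(pkg); the (visited, result) pair is the state the Python closure mutates.
-- fuel only bounds the recursion depth for totality (depth ≤ |pvUniv|+1, proved in the lemmas).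
def visitB (graph : List (String × List String)) (fuel : Nat)
    (visited : PySem.Set String) (result : List String) (pkg : String) :
    PySem.Set String × List String :=
  match fuel with
  | 0 => (visited, result)
  | f + 1 =>
      if pkg ∈ visited then (visited, result)
      else
        (pvDeps graph pkg).reverse.foldl
          (fun vr dep => visitB graph f vr.1 vr.2 dep)
          (PySem.Set.add visited pkg, result ++ [pkg])

def dfs_transitive_alt (graph : List (String × List String)) (start_pkg : String) : List String :=
  let vr := visitB graph ((pvUniv graph start_pkg).length + 1) PySem.Set.empty [] start_pkg
  match PySem.List.remove? vr.2 start_pkg with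
  | some r => r
  | none => []  -- unreachable: helper(start_pkg) always appends start_pkg first

-- ===== PRECONDITION & SPEC =====
def Spec_dfs_transitive (graph : List (String × List String)) (start_pkg : String) (out : List String) : Prop := out = dfs_transitive_alt graph start_pkg
instance (graph : List (String × List String)) (start_pkg : String) (out : List String) : Decidable (Spec_dfs_transitive graph start_pkg out) := by unfold Spec_dfs_transitive; infer_instance

-- ===== CLAIM (what is proved, stated in full; the proofs are below) =====
def Claim_equal_dfs_transitive : Prop := ∀ (graph : List (String × List String)) (start_pkg : String), Dom_dfs_transitive graph start_pkg → Spec_dfs_transitive graph start_pkg (dfs_transitive graph start_pkg)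

-- ===== LEMMAS AND PROOFS =====

-- visited never shrinks: appending elements can only lower the measure
theorem pvUnvis_append_le (graph : List (String × List String)) (start_pkg : String)
    (v e : List String) :
    pvUnvis graph start_pkg (v ++ e) ≤ pvUnvis graph start_pkg v := by
  unfold pvUnvis
  apply List.Sublist.length_le
  apply List.monotone_filter_right
  intro a
  simp only [List.mem_append, decide_eq_true_eq, not_or]
  tauto


-- visitB only ever appends to visited and to result
theorem visitB_extend (graph : List (String × List String)) (f : Nat) :
    (∀ v r p, ∃ e1 e2, visitB graph f v r p = (v ++ e1, r ++ e2)) := by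
  induction f with
  | zero => exact fun v r p => ⟨[], [], by simp [visitB]⟩
  | succ f ih =>
      intro v r p
      by_cases hp : p ∈ v
      · exact ⟨[], [], by simp [visitB, hp]⟩
      · have hfold : ∀ (l : List String) (w : PySem.Set String) (rr : List String),
            ∃ e1 e2, l.foldl (fun vr dep => visitB graph f vr.1 vr.2 dep) (w, rr)
              = (w ++ e1, rr ++ e2) := by
          intro l
          induction l with
          | nil => exact fun w rr => ⟨[], [], by simp⟩
          | cons d l ihl =>
              intro w rr
              obtain ⟨a1, a2, h1⟩ := ih w rr d
              obtain ⟨b1, b2, h2⟩ := ihl (w ++ a1) (rr ++ a2)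
              exact ⟨a1 ++ b1, a2 ++ b2, by simp [List.foldl_cons, h1, h2]⟩
        obtain ⟨e1, e2, h⟩ := hfold (pvDeps graph p).reverse (PySem.Set.add v p) (r ++ [p])
        rw [PySem.Set.add_of_not_mem hp] at h
        refine ⟨[p] ++ e1, [p] ++ e2, ?_⟩
        simp only [visitB, if_neg hp]
        rw [PySem.Set.add_of_not_mem hp, h]
        simp

-- fuel irrelevance: any fuel strictly above the unvisited count gives the same run
theorem visitB_mono (graph : List (String × List String)) (start_pkg : String) (N : Nat) :
    ∀ (f1 f2 : Nat) (v : PySem.Set String) (r : List String) (p : String),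
      pvUnvis graph start_pkg v ≤ N → N < f1 → N < f2 →
      visitB graph f1 v r p = visitB graph f2 v r p := by
  induction N using Nat.strong_induction_on with
  | _ N IH =>
      intro f1 f2 v r p hN h1 h2
      match f1, f2 with
      | a + 1, b + 1 =>
        simp only [visitB]
        by_cases hp : p ∈ v
        · simp [hp]
        · simp only [if_neg hp]
          by_cases hU : p ∈ pvUniv graph start_pkg
          · have hlt := pvUnvis_add_lt graph start_pkg p v hU hp
            set M := pvUnvis graph start_pkg (PySem.Set.add v p) with hM
            have hMN : M < N := by omega
            have hMa : M < a := by omega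
            have hMb : M < b := by omega
            have hfold : ∀ (l : List String) (w : PySem.Set String) (rr : List String),
                pvUnvis graph start_pkg w ≤ M →
                l.foldl (fun vr dep => visitB graph a vr.1 vr.2 dep) (w, rr)
                  = l.foldl (fun vr dep => visitB graph b vr.1 vr.2 dep) (w, rr) := by
              intro l
              induction l with
              | nil => intro w rr _; rfl
              | cons d l ihl =>
                  intro w rr hw
                  have hd : visitB graph a w rr d = visitB graph b w rr d :=
                    IH M hMN a b w rr d hw hMa hMb
                  obtain ⟨e1, e2, hX⟩ := visitB_extend graph b w rr d
                  simp only [List.foldl_cons]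
                  rw [hd, hX]
                  exact ihl (w ++ e1) (rr ++ e2)
                    (le_trans (pvUnvis_append_le graph start_pkg w e1) hw)
            exact hfold _ _ _ (le_of_eq hM.symm)
          · rw [pvDeps_of_not_mem_univ graph start_pkg p hU]
            rfl

theorem foldVisit_mono (graph : List (String × List String)) (start_pkg : String)
    (l : List String) : ∀ (f1 f2 : Nat) (v : PySem.Set String) (r : List String),
    pvUnvis graph start_pkg v < f1 → pvUnvis graph start_pkg v < f2 →
    l.foldl (fun vr dep => visitB graph f1 vr.1 vr.2 dep) (v, r)
      = l.foldl (fun vr dep => visitB graph f2 vr.1 vr.2 dep) (v, r) := by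
  induction l with
  | nil => intro f1 f2 v r _ _; rfl
  | cons d l ihl =>
      intro f1 f2 v r h1 h2
      have hd : visitB graph f1 v r d = visitB graph f2 v r d :=
        visitB_mono graph start_pkg (pvUnvis graph start_pkg v) f1 f2 v r d le_rfl h1 h2
      obtain ⟨e1, e2, hX⟩ := visitB_extend graph f2 v r d
      simp only [List.foldl_cons]
      rw [hd, hX]
      exact ihl f1 f2 (v ++ e1) (r ++ e2)
        (lt_of_le_of_lt (pvUnvis_append_le graph start_pkg v e1) h1)
        (lt_of_le_of_lt (pvUnvis_append_le graph start_pkg v e1) h2)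

-- deps already in v0 are skipped by visitB anyway: the push-time filter is redundant
theorem foldVisit_skip (graph : List (String × List String)) (f : Nat) (hf : 0 < f)
    (l : List String) (v0 : List String) :
    ∀ (w : PySem.Set String) (r : List String), (∀ x ∈ v0, x ∈ w) →
    (l.filter (fun d => decide (d ∉ v0))).foldl (fun vr dep => visitB graph f vr.1 vr.2 dep) (w, r)
      = l.foldl (fun vr dep => visitB graph f vr.1 vr.2 dep) (w, r) := by
  induction l with
  | nil => intro w r _; rfl
  | cons d l ihl =>
      intro w r hsub
      obtain ⟨f', rfl⟩ : ∃ f', f = f' + 1 := ⟨f - 1, by omega⟩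
      by_cases hd : d ∈ v0
      · have hskip : visitB graph (f' + 1) w r d = (w, r) := by
          simp [visitB, hsub d hd]
        rw [List.filter_cons, if_neg (by simp [hd])]
        simp only [List.foldl_cons, hskip]
        exact ihl w r hsub
      · rw [List.filter_cons, if_pos (by simp [hd])]
        simp only [List.foldl_cons]
        obtain ⟨e1, e2, hX⟩ := visitB_extend graph (f' + 1) w r d
        rw [hX]
        exact ihl (w ++ e1) (r ++ e2) (fun x hx => List.mem_append_left e1 (hsub x hx))

-- A's inner for-loop, as it acts on the head-is-top stack
theorem push_eq (deps : List String) (w : PySem.Set String) :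
    ∀ (s : List String),
    deps.foldl (fun st dep => if dep ∉ w then dep :: st else st) s
      = (deps.filter (fun d => decide (d ∉ w))).reverse ++ s := by
  induction deps with
  | nil => intro s; rfl
  | cons d rest ih =>
      intro s
      by_cases hd : d ∈ w
      · rw [List.foldl_cons, if_neg (not_not_intro hd), List.filter_cons,
          if_neg (by simp [hd])]
        exact ih s
      · simp only [List.foldl_cons, List.filter_cons, if_pos hd]
        rw [if_pos (by simp [hd])]
        rw [ih (d :: s)]
        simp

-- main bridge: the stack loop is the fold of the recursive visit over the stack
theorem bridge (graph : List (String × List String)) (start_pkg : String)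
    (v : PySem.Set String) (s : List String) (r : List String) :
    ∀ (f : Nat), pvUnvis graph start_pkg v < f →
    dfsLoopA graph start_pkg v s r
      = (s.foldl (fun vr p => visitB graph f vr.1 vr.2 p) (v, r)).2 := by
  induction v, s, r using dfsLoopA.induct graph start_pkg with
  | case1 v r =>
      intro f hf
      simp [dfsLoopA]
  | case2 v r pkg s hp ih =>
      intro f hf
      obtain ⟨f', rfl⟩ : ∃ f', f = f' + 1 := ⟨f - 1, by omega⟩
      simp only [List.foldl_cons]
      have hskip : visitB graph (f' + 1) v r pkg = (v, r) := by simp [visitB, hp]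
      rw [dfsLoopA, if_pos hp, hskip]
      exact ih (f' + 1) hf
  | case3 v r pkg s hp ih =>
      intro f hf
      obtain ⟨f', rfl⟩ : ∃ f', f = f' + 1 := ⟨f - 1, by omega⟩
      have hadd : PySem.Set.add v pkg = v ++ [pkg] := PySem.Set.add_of_not_mem hp
      have hle : pvUnvis graph start_pkg (PySem.Set.add v pkg) ≤ pvUnvis graph start_pkg v := by
        rw [hadd]; exact pvUnvis_append_le graph start_pkg v [pkg]
      rw [dfsLoopA, if_neg hp]
      rw [push_eq]
      simp only [dite_eq_ite] at ih
      simp only [push_eq] at ih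
      rw [ih (f' + 1) (by omega)]
      simp only [List.foldl_append, List.foldl_cons]
      congr 2
      rw [← List.filter_reverse]
      rw [foldVisit_skip graph (f' + 1) (by omega) _ (PySem.Set.add v pkg)
        (PySem.Set.add v pkg) (r ++ [pkg]) (fun x hx => hx)]
      simp only [visitB, if_neg hp]
      by_cases hU : pkg ∈ pvUniv graph start_pkg
      · exact foldVisit_mono graph start_pkg _ (f' + 1) f' _ _
          (by omega) (by have := pvUnvis_add_lt graph start_pkg pkg v hU hp; omega)
      · rw [pvDeps_of_not_mem_univ graph start_pkg pkg hU]
        rfl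

theorem main_eq (graph : List (String × List String)) (start_pkg : String) :
    dfs_transitive graph start_pkg = dfs_transitive_alt graph start_pkg := by
  have hF : pvUnvis graph start_pkg PySem.Set.empty < (pvUniv graph start_pkg).length + 1 := by
    unfold pvUnvis
    have := List.length_filter_le (fun x => decide (x ∉ (PySem.Set.empty : PySem.Set String)))
      (pvUniv graph start_pkg)
    omega
  simp only [dfs_transitive, dfs_transitive_alt]
  rw [bridge graph start_pkg PySem.Set.empty [start_pkg] [] _ hF]
  simp only [List.foldl_cons, List.foldl_nil]

-- ===== VERDICT (by name: the statement is the Claim_ definition above) =====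
theorem dfs_transitive_spec : Claim_equal_dfs_transitive := by
  intro graph start_pkg _
  unfold Spec_dfs_transitive
  exact main_eq graph start_pkg
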